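-- pv_equiv track=rewrite | github.com/ryangrayson1/advent-of-code-2022 | day17.py | hsh
-- ===== SOURCE A (Python) =====
-- def hsh(i, j, cave):
--     s = [i, j[0]]
--     for col in range(7):
--         for row in range(1, len(cave) + 1):
--             if cave[-row][col] == '#':
--                 s.append(row)
--                 break
--         else:
--             s.append(0)
--     return ','.join([str(c) for c in s])
-- ===== SOURCE B (Python) =====
-- def hsh(i, j, cave):
--     # Single top-down pass over rows, maintaining the set of still-unresolved
--     # columns; stops as soon as every column's depth is known.
--     depth = [0] * 7
--     remaining = list(range(7))
--     row = 0
--     for line in reversed(cave):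
--         if not remaining:
--             break
--         row += 1
--         still = []
--         for col in remaining:
--             if line[col] == '#':
--                 depth[col] = row
--             else:
--                 still.append(col)
--         remaining = still
--     return ','.join(str(c) for c in [i, j[0]] + depth)
-- ===== Notes on version B (the rewrite author's own statement) =====
-- stated objective: alternative
-- what changed: Replaces the 7 per-column top-down scans by one row-major top-down sweep that maintains the set of still-unresolved columns in a depth array and stops early once all 7 columns are resolved.
-- outside the precondition, e.g. on hsh(0, [0], ['x', '#######']): A returns '0,0,1,1,1,1,1,1,1', B returns '0,0,1,1,1,1,1,1,1'
import Mathlib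
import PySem

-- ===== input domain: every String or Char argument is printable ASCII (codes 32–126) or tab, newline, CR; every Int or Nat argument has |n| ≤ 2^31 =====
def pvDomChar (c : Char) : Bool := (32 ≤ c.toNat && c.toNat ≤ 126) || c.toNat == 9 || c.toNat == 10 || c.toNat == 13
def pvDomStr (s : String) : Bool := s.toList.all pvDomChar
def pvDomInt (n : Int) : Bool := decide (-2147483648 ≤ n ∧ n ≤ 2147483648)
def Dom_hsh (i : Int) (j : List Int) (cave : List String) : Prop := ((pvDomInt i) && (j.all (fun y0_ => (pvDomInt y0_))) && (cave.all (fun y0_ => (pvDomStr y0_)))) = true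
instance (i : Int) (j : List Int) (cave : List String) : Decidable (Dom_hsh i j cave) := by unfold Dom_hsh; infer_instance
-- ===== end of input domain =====

-- B replaces A's 7 per-column top-down scans by one row-major top-down sweep maintaining the
-- set of still-unresolved columns, stopping once all 7 are resolved (alternative decomposition).

-- ===== PORT A =====
-- inner 'for row in range(1, len(cave)+1): … break / else: append 0' loop of A, for one column
def hshColScan (cave : List String) (col : Int) (acc : List Int) : List Int → List Int
  | [] => acc ++ [0]
  | r :: rs =>
      if (PySem.List.pyGet? cave (-r)).bind (fun line => PySem.Str.pyGet? line col) = some '#' then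
        acc ++ [r]
      else
        hshColScan cave col acc rs

def hsh (i : Int) (j : List Int) (cave : List String) : String :=
  -- s = [i, j[0]]  (j[0]: Pre_ guarantees j ≠ []; headD is only a totalizer outside Pre_)
  let s : List Int := [i, j.headD 0]
  let s := (PySem.List.pyRange 0 7 1).foldl
    (fun acc col => hshColScan cave col acc (PySem.List.pyRange 1 ((cave.length : Int) + 1) 1)) s
  PySem.Str.join "," (s.map (fun c => PySem.Int.toStr c))

-- ===== PORT B =====
-- one column test inside B's row sweep: resolve col at this row, or keep it in 'still'
def hshAltStep (line : String) (row : Int) (p : List Int × List Nat) (col : Nat) : List Int × List Nat :=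
  if PySem.Str.pyGet? line (col : Int) = some '#' then (p.1.set col row, p.2)
  else (p.1, p.2 ++ [col])

-- B's 'for line in reversed(cave)' loop with early break once no column remains
def hshAltLoop : List String → Int → List Int → List Nat → List Int
  | [], _, depth, _ => depth
  | line :: rest, row, depth, remaining =>
      if remaining.isEmpty then depth
      else
        let p := remaining.foldl (hshAltStep line row) (depth, [])
        hshAltLoop rest (row + 1) p.1 p.2

def hsh_alt (i : Int) (j : List Int) (cave : List String) : String :=
  let depth := hshAltLoop cave.reverse 1 (List.replicate 7 (0 : Int)) (List.range 7)
  PySem.Str.join "," (([i, j.headD 0] ++ depth).map (fun c => PySem.Int.toStr c))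

-- ===== PRECONDITION & SPEC =====
-- Pre_ excludes j = [] and caves containing a row shorter than 7 characters: there the Python A
-- raises IndexError — except on the rare inputs where every column shows '#' strictly above every
-- short row, where A still returns; those inputs are excluded too (B raises on most of them as well).
def Pre_hsh (i : Int) (j : List Int) (cave : List String) : Prop :=
  j ≠ [] ∧ ∀ s ∈ cave, 7 ≤ s.toList.length
instance (i : Int) (j : List Int) (cave : List String) : Decidable (Pre_hsh i j cave) := by
  unfold Pre_hsh; infer_instance

def pvWitness_hsh : Int × List Int × List String := (3, [5], ["..#....", "#.....#"])

def Spec_hsh (i : Int) (j : List Int) (cave : List String) (out : String) : Prop := out = hsh_alt i j cave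
instance (i : Int) (j : List Int) (cave : List String) (out : String) : Decidable (Spec_hsh i j cave out) := by unfold Spec_hsh; infer_instance

-- ===== CLAIM (what is proved, stated in full; the proofs are below) =====
def Claim_equal_hsh : Prop := ∀ (i : Int) (j : List Int) (cave : List String), Dom_hsh i j cave → Pre_hsh i j cave → Spec_hsh i j cave (hsh i j cave)

-- ===== LEMMAS AND PROOFS =====

-- character-at-column test shared by both characterizations
def colHit (line : String) (col : Int) : Bool := PySem.Str.pyGet? line col == some '#'

-- index (from the top, 0-based) of the first row showing '#' in column col
def colIdx? (col : Int) : List String → Option Nat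
  | [] => none
  | line :: rest => if colHit line col then some 0 else (colIdx? col rest).map (· + 1)

-- the depth value both programs record for one column
def colDepth (rows : List String) (col : Int) : Int :=
  match colIdx? col rows with
  | some m => ((m + 1 : Nat) : Int)
  | none => 0

theorem hshColScan_spec (cave : List String) (col : Int) :
    ∀ d k : Nat, cave.length - k = d → k ≤ cave.length → ∀ acc : List Int,
      hshColScan cave col acc (PySem.List.pyRange ((k : Int) + 1) ((cave.length : Int) + 1) 1)
        = acc ++ [match colIdx? col (cave.reverse.drop k) with
                  | some m => ((k + m + 1 : Nat) : Int)
                  | none => 0] := by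
  intro d
  induction d with
  | zero =>
      intro k hd hk acc
      have hkk : k = cave.length := by omega
      subst hkk
      rw [PySem.List.pyRange_one_eq_nil (by omega)]
      rw [show List.drop cave.length cave.reverse = [] from by simp]
      simp [hshColScan, colIdx?]
  | succ d ih =>
      intro k hd hk acc
      have hklt : k < cave.length := by omega
      rw [PySem.List.pyRange_one_cons (by omega)]
      have hget : PySem.List.pyGet? cave (-((k : Int) + 1)) = cave[cave.length - (k + 1)]? := by
        have h1 : -((k : Int) + 1) = -(((k + 1 : Nat) : Int)) := by push_cast; ring_nf
        rw [h1, PySem.List.pyGet?_neg_natCast cave (k + 1) (by omega) (by omega)]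
      have hrev : cave.reverse.drop k = cave[cave.length - (k + 1)] :: cave.reverse.drop (k + 1) := by
        rw [List.drop_eq_getElem_cons (by simpa using hklt)]
        congr 1
        rw [List.getElem_reverse]
        congr 1
        omega
      have hline : cave[cave.length - (k + 1)]? = some cave[cave.length - (k + 1)] :=
        List.getElem?_eq_getElem (by omega)
      show hshColScan cave col acc (((k : Int) + 1) :: _) = _
      rw [hshColScan, hget, hline, hrev]
      by_cases hc : colHit cave[cave.length - (k + 1)] col = true
      · have hs : (some cave[cave.length - (k + 1)]).bind (fun line => PySem.Str.pyGet? line col) = some '#' := by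
          simpa [colHit] using hc
        rw [if_pos hs]
        simp [colIdx?, hc]
      · have hne : ¬ (some cave[cave.length - (k + 1)]).bind (fun line => PySem.Str.pyGet? line col) = some '#' := by
          simpa [colHit] using hc
        rw [if_neg hne]
        have h2 : ((k : Int) + 1 + 1) = ((k + 1 : Nat) : Int) + 1 := by push_cast; ring
        rw [h2, ih (k + 1) (by omega) (by omega) acc]
        simp only [colIdx?, hc, if_false, Bool.false_eq_true]
        cases h : colIdx? col (cave.reverse.drop (k + 1)) with
        | none => simp
        | some m =>
            simp only [Option.map_some]
            have he : k + (m + 1) + 1 = k + 1 + m + 1 := by omega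
            rw [he]

theorem hshColScan_top (cave : List String) (col : Int) (acc : List Int) :
    hshColScan cave col acc (PySem.List.pyRange 1 ((cave.length : Int) + 1) 1)
      = acc ++ [colDepth cave.reverse col] := by
  have h := hshColScan_spec cave col cave.length 0 (by omega) (by omega) acc
  simpa [colDepth] using h

-- the fold over 'remaining' inside one row of B: first component (the depth array)
theorem hshAltFold_fst (line : String) (row : Int) :
    ∀ (rem : List Nat) (depth : List Int) (acc : List Nat) (x : Nat),
      (rem.foldl (hshAltStep line row) (depth, acc)).1[x]? =
        if x ∈ rem ∧ colHit line (x : Int) = true ∧ x < depth.length then some row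
        else depth[x]? := by
  intro rem
  induction rem with
  | nil => intro depth acc x; simp
  | cons c cs ih =>
      intro depth acc x
      rw [List.foldl_cons]
      by_cases hc : PySem.Str.pyGet? line (c : Int) = some '#'
      · rw [show hshAltStep line row (depth, acc) c = (depth.set c row, acc) from by
          unfold hshAltStep; rw [if_pos hc]]
        rw [ih]
        by_cases hx : x = c
        · subst hx
          have hcolx : colHit line (x : Int) = true := by
            simp only [colHit, beq_iff_eq]; exact hc
          by_cases hxd : x < depth.length
          · by_cases hmem : x ∈ cs <;>
              simp [hmem, hcolx, hxd, List.length_set]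
          · by_cases hmem : x ∈ cs <;>
              simp [hmem, hcolx, hxd, List.length_set]
        · rw [List.getElem?_set_ne (by omega : c ≠ x)]
          simp [List.length_set, hx]
      · rw [show hshAltStep line row (depth, acc) c = (depth, acc ++ [c]) from by
          unfold hshAltStep; rw [if_neg hc]]
        rw [ih]
        by_cases hx : x = c
        · subst hx
          have hcolx : ¬ colHit line (x : Int) = true := by
            simp only [colHit, beq_iff_eq]; exact hc
          simp [hcolx]
        · simp [hx]

-- the fold over 'remaining' inside one row of B: second component (the 'still' list)
theorem hshAltFold_snd (line : String) (row : Int) :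
    ∀ (rem : List Nat) (depth : List Int) (acc : List Nat),
      (rem.foldl (hshAltStep line row) (depth, acc)).2 =
        acc ++ rem.filter (fun c : Nat => !(colHit line ↑c)) := by
  intro rem
  induction rem with
  | nil => intro depth acc; simp
  | cons c cs ih =>
      intro depth acc
      rw [List.foldl_cons]
      by_cases hc : PySem.Str.pyGet? line (c : Int) = some '#'
      · rw [show hshAltStep line row (depth, acc) c = (depth.set c row, acc) from by
          unfold hshAltStep; rw [if_pos hc]]
        rw [ih]
        have hc' : line.toList[c]? = some '#' := by simpa using hc
        simp [colHit, hc']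
      · rw [show hshAltStep line row (depth, acc) c = (depth, acc ++ [c]) from by
          unfold hshAltStep; rw [if_neg hc]]
        rw [ih]
        have hc' : ¬ line.toList[c]? = some '#' := by simpa using hc
        simp [colHit, hc']

theorem hshAltFold_len (line : String) (row : Int) :
    ∀ (rem : List Nat) (depth : List Int) (acc : List Nat),
      (rem.foldl (hshAltStep line row) (depth, acc)).1.length = depth.length := by
  intro rem
  induction rem with
  | nil => intro depth acc; simp
  | cons c cs ih =>
      intro depth acc
      rw [List.foldl_cons]
      by_cases hc : PySem.Str.pyGet? line (c : Int) = some '#'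
      · rw [show hshAltStep line row (depth, acc) c = (depth.set c row, acc) from by
          unfold hshAltStep; rw [if_pos hc]]
        rw [ih]; simp
      · rw [show hshAltStep line row (depth, acc) c = (depth, acc ++ [c]) from by
          unfold hshAltStep; rw [if_neg hc]]
        exact ih depth (acc ++ [c])

theorem hshAltLoop_spec :
    ∀ (rows : List String) (r0 : Int) (depth : List Int) (rem : List Nat),
      (∀ c ∈ rem, c < depth.length) →
      ∀ x : Nat,
        (hshAltLoop rows r0 depth rem)[x]? =
          if x ∈ rem then
            (match colIdx? (x : Int) rows with
             | some m => some (r0 + (m : Int))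
             | none => depth[x]?)
          else depth[x]? := by
  intro rows
  induction rows with
  | nil =>
      intro r0 depth rem hrem x
      by_cases hx : x ∈ rem <;> simp [hshAltLoop, colIdx?, hx]
  | cons line rest ih =>
      intro r0 depth rem hrem x
      rw [hshAltLoop]
      by_cases hemp : rem.isEmpty
      · have hnil : rem = [] := List.isEmpty_iff.mp hemp
        subst hnil
        simp
      · rw [if_neg hemp]
        have hlen : (rem.foldl (hshAltStep line r0) (depth, ([] : List Nat))).1.length = depth.length :=
          hshAltFold_len line r0 rem depth []
        rw [ih _ _ _ (by
          intro c hcmem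
          rw [hshAltFold_snd] at hcmem
          simp only [List.nil_append, List.mem_filter] at hcmem
          rw [hlen]
          exact hrem c hcmem.1)]
        rw [hshAltFold_snd, hshAltFold_fst]
        simp only [List.nil_append, List.mem_filter]
        by_cases hx : x ∈ rem
        · by_cases hc : colHit line (x : Int) = true
          · have hxd : x < depth.length := hrem x hx
            simp [hx, hc, hxd, colIdx?]
          · have hcb : colHit line (x : Int) = false := by simpa using hc
            cases hidx : colIdx? (x : Int) rest with
            | none => simp [hx, hcb, hidx, colIdx?]
            | some m =>
                simp [hx, hcb, hidx, colIdx?]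
                ring
        · simp [hx]

-- B's depth array equals the per-column map A computes
theorem depth_eq (cave : List String) :
    hshAltLoop cave.reverse 1 (List.replicate 7 (0 : Int)) (List.range 7)
      = (PySem.List.pyRange 0 7 1).map (colDepth cave.reverse) := by
  apply List.ext_getElem?
  intro x
  rw [hshAltLoop_spec cave.reverse 1 _ _ (by intro c hc; simp at hc ⊢; omega) x]
  rw [show PySem.List.pyRange 0 7 1 = (List.range 7).map (fun k : Nat => (k : Int)) from by decide]
  rw [List.map_map, List.getElem?_map]
  by_cases hx : x < 7
  · rw [List.getElem?_range hx]
    simp only [List.mem_range, hx, if_true, Function.comp, Option.map_some]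
    unfold colDepth
    cases h : colIdx? ((x : Nat) : Int) cave.reverse with
    | none =>
        simp [hx]
        interval_cases x <;> rfl
    | some m => simp; ring
  · rw [List.getElem?_eq_none (by simpa using hx)]
    simp [List.mem_range, hx]

-- ===== VERDICT (by name: the statement is the Claim_ definition above) =====
theorem hsh_spec : Claim_equal_hsh := by
  intro i j cave _hdom _hpre
  unfold Spec_hsh hsh hsh_alt
  have hA : (PySem.List.pyRange 0 7 1).foldl
      (fun acc col => hshColScan cave col acc (PySem.List.pyRange 1 ((cave.length : Int) + 1) 1))
      [i, j.headD 0]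
      = [i, j.headD 0] ++ (PySem.List.pyRange 0 7 1).map (colDepth cave.reverse) := by
    rw [show (fun (acc : List Int) (col : Int) =>
          hshColScan cave col acc (PySem.List.pyRange 1 ((cave.length : Int) + 1) 1))
        = (fun acc col => acc ++ [colDepth cave.reverse col]) from by
      funext acc col; exact hshColScan_top cave col acc]
    exact PySem.List.foldl_append_singleton_eq_map _ _ _
  simp only [hA, depth_eq cave]
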